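-- pv_equiv track=rewrite | github.com/ONSdigital/ras-rm-performance-tests | sdc/csvfile.py | _count_lines
-- ===== SOURCE A (Python) =====
-- def _count_lines(lines, filename):
--     count = 0
--     cols = None
--
--     for line in lines:
--         if cols is None:
--             cols = len(line)
--
--         if len(line) != cols:
--             raise InvalidCSVFormat.wrong_number_if_cols(filename)
--
--         count += 1
--
--     return count
--
-- class InvalidCSVFormat(Exception):
--     @staticmethod
--     def wrong_number_if_cols(filename):
--         return InvalidCSVFormat(
--             f'All rows must have the same number of columns in {filename}.')
--
--     def __init__(self, message):
--         self.message = message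
-- ===== SOURCE B (Python) =====
-- def _count_lines(lines, filename):
--     lengths = [len(line) for line in lines]
--     if lengths and len(set(lengths)) > 1:
--         raise InvalidCSVFormat.wrong_number_if_cols(filename)
--     return len(lengths)
--
--
-- class InvalidCSVFormat(Exception):
--     @staticmethod
--     def wrong_number_if_cols(filename):
--         return InvalidCSVFormat(
--             f'All rows must have the same number of columns in {filename}.')
--
--     def __init__(self, message):
--         self.message = message
-- ===== Notes on version B (the rewrite author's own statement) =====
-- stated objective: simpler
-- what changed: Replaces A's stateful loop (running count plus a lazily-initialised cols sentinel with a per-line early-exit check) by one comprehension collecting all row lengths followed by a single set-uniqueness test; the count is just len(lengths).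
import Mathlib
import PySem

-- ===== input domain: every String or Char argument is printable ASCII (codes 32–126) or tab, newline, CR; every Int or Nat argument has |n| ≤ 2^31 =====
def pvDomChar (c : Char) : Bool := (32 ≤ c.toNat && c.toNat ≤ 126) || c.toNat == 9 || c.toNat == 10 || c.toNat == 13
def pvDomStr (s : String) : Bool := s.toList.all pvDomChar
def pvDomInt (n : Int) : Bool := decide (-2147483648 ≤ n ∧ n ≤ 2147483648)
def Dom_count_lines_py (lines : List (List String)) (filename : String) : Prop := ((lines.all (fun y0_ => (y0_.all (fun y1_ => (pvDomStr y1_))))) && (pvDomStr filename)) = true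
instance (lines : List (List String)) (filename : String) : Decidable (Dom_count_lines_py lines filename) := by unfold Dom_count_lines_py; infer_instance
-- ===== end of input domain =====

-- B: collect all row lengths in one map, test uniqueness once with a set, count = len(lengths);
-- objective: simpler (one comprehension + one set test instead of A's stateful loop with a cols sentinel).
-- ===== PORT A =====
-- loop of A: state = (cols sentinel, running count); the 'raise' branch returns the junk value 0,
-- excluded by Pre_count_lines_py.
def count_lines_py_go (cols : Option Int) (count : Int) : List (List String) → Int
  | [] => count
  | line :: rest =>
    let c := cols.getD (line.length : Int)
    if (line.length : Int) ≠ c then 0  -- raise InvalidCSVFormat (outside Pre_)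
    else count_lines_py_go (some c) (count + 1) rest

def count_lines_py (lines : List (List String)) (filename : String) : Int :=
  count_lines_py_go none 0 lines

-- ===== PORT B =====
def count_lines_py_alt (lines : List (List String)) (filename : String) : Int :=
  let lengths : List Int := lines.map (fun line => (line.length : Int))
  if lengths ≠ [] ∧ 1 < (PySem.Set.ofList lengths).length then 0  -- raise InvalidCSVFormat (outside Pre_)
  else (lengths.length : Int)

-- ===== PRECONDITION & SPEC =====
-- Pre_ excludes exactly the inputs on which A (and B) raise InvalidCSVFormat: some row's
-- column count differs from the first row's.
def Pre_count_lines_py (lines : List (List String)) (filename : String) : Prop :=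
  ∀ l ∈ lines, l.length = (lines.headD []).length
instance (lines : List (List String)) (filename : String) : Decidable (Pre_count_lines_py lines filename) := by unfold Pre_count_lines_py; infer_instance

def pvWitness_count_lines_py : List (List String) × String := ([["a", "b"], ["c", "d"]], "f.csv")

def Spec_count_lines_py (lines : List (List String)) (filename : String) (out : Int) : Prop := out = count_lines_py_alt lines filename
instance (lines : List (List String)) (filename : String) (out : Int) : Decidable (Spec_count_lines_py lines filename out) := by unfold Spec_count_lines_py; infer_instance

-- ===== CLAIM (what is proved, stated in full; the proofs are below) =====
def Claim_equal_count_lines_py : Prop := ∀ (lines : List (List String)) (filename : String), Dom_count_lines_py lines filename → Pre_count_lines_py lines filename → Spec_count_lines_py lines filename (count_lines_py lines filename)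

-- ===== LEMMAS AND PROOFS =====

theorem go_all_eq (c : Int) (count : Int) (xs : List (List String))
    (h : ∀ l ∈ xs, (l.length : Int) = c) :
    count_lines_py_go (some c) count xs = count + xs.length := by
  induction xs generalizing count with
  | nil => simp [count_lines_py_go]
  | cons l rest ih =>
    have hl : (l.length : Int) = c := h l (by simp)
    simp [count_lines_py_go, hl, ih _ (fun x hx => h x (by simp [hx]))]
    omega

theorem foldl_add_const (x : Int) (xs : List Int) (h : ∀ y ∈ xs, y = x) :
    xs.foldl PySem.Set.add [x] = [x] := by
  induction xs with
  | nil => rfl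
  | cons y rest ih =>
    have : y = x := h y (by simp)
    subst this
    simp [PySem.Set.add, PySem.Set.contains]
    exact ih (fun z hz => h z (by simp [hz]))

theorem count_lines_py_spec : Claim_equal_count_lines_py := by
  unfold Claim_equal_count_lines_py
  intro lines filename _ hpre
  unfold Spec_count_lines_py count_lines_py count_lines_py_alt
  cases lines with
  | nil => rfl
  | cons l rest =>
    have hc : ∀ x ∈ rest, (x.length : Int) = (l.length : Int) := by
      intro x hx
      have := hpre x (by simp [hx])
      simp at this; simp [this]
    have hA : count_lines_py_go none 0 (l :: rest) = (l :: rest).length := by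
      simp [count_lines_py_go, go_all_eq (l.length : Int) 1 rest hc]
      omega
    have hset : PySem.Set.ofList ((l.length : Int) :: rest.map (fun line => (line.length : Int))) =
        [(l.length : Int)] := by
      rw [PySem.Set.ofList_eq_foldl]
      simp only [List.foldl, PySem.Set.add, PySem.Set.contains, List.contains_nil,
        Bool.false_eq_true, if_false, List.nil_append]
      exact foldl_add_const _ _ (by simpa using hc)
    simp [hA, hset]

-- ===== VERDICT (by name: the statement is the Claim_ definition above) =====
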